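-- pv_equiv track=rewrite | github.com/srinugsr2020/dsa_problems | Chapter5/easy/contains_nearby_duplicate.py | find_nearby_duplicates
-- ===== SOURCE A (Python) =====
-- from typing import List
--
-- def find_nearby_duplicates(nums: List[int], k: int) -> List[tuple]:
--     """
--     Find all pairs of indices where nums[i] == nums[j] and |i - j| <= k.
--
--     Useful for understanding and debugging.
--
--     Args:
--         nums: Input array of integers
--         k: Maximum distance between duplicate indices
--
--     Returns:
--         List of (i, j) tuples representing duplicate pairs
--     """
--     pairs = []
--     index_map = {}  # num -> list of indices
--
--     for i, num in enumerate(nums):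
--         if num in index_map:
--             for j in index_map[num]:
--                 if i - j <= k:
--                     pairs.append((j, i))
--
--         if num not in index_map:
--             index_map[num] = []
--         index_map[num].append(i)
--
--     return pairs
-- ===== SOURCE B (Python) =====
-- from typing import List
--
-- def find_nearby_duplicates(nums: List[int], k: int) -> List[tuple]:
--     """Sliding-window scan: for each i, check only the k preceding indices."""
--     return [(j, i)
--             for i in range(len(nums))
--             for j in range(max(0, i - k), i)
--             if nums[j] == nums[i]]
-- ===== Notes on version B (the rewrite author's own statement) =====
-- stated objective: simpler
-- what changed: A builds a dict mapping each value to all its previous indices and rescans that whole list at every repeat; B drops the dict entirely and, for each i, scans only the window of the k preceding indices directly.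
import Mathlib
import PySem

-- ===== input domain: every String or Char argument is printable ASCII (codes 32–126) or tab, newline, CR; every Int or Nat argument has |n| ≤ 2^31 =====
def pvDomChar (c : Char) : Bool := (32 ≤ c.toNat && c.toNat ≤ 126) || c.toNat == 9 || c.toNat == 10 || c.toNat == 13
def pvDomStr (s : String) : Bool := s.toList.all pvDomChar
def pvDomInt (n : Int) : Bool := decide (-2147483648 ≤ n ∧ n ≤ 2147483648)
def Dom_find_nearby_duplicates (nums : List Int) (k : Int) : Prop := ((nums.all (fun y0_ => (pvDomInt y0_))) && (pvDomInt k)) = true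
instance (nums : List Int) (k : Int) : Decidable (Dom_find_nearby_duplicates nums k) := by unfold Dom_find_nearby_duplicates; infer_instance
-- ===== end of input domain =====

-- B replaces A's hash-of-index-lists with a direct sliding-window scan: for each i it checks
-- only the preceding indices within distance k; objective: simpler — no dict, one comprehension.

-- ===== PORT A =====
-- The literal body of A's `for i, num in enumerate(nums)` loop; state = (pairs, index_map).
-- `index_map[num]` is guarded by `num in index_map`, so `getD … []` never supplies its default.
def fndA_step (k : Int) (st : List (Int × Int) × PySem.Dict Int (List Int)) (p : Int × Int) :
    List (Int × Int) × PySem.Dict Int (List Int) :=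
  let i := p.1
  let num := p.2
  -- if num in index_map: for j in index_map[num]: if i - j <= k: pairs.append((j, i))
  let pairs :=
    if st.2.contains num then
      (st.2.getD num []).foldl (fun ps j => if i - j ≤ k then ps ++ [(j, i)] else ps) st.1
    else st.1
  -- if num not in index_map: index_map[num] = []
  let d := if st.2.contains num then st.2 else st.2.insert num []
  -- index_map[num].append(i)
  (pairs, d.modify num [] (fun l => l ++ [i]))

def find_nearby_duplicates (nums : List Int) (k : Int) : List (Int × Int) :=
  ((PySem.List.enumerate nums 0).foldl (fndA_step k) ([], PySem.Dict.empty)).1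

-- ===== PORT B =====
-- [(j, i) for i in range(len(nums)) for j in range(max(0, i - k), i) if nums[j] == nums[i]]
-- (0 ≤ j < i < len(nums), so pyGetD's default is never supplied)
def find_nearby_duplicates_alt (nums : List Int) (k : Int) : List (Int × Int) :=
  (PySem.List.pyRange 0 (PySem.List.len nums) 1).flatMap (fun i =>
    ((PySem.List.pyRange (max 0 (i - k)) i 1).filter
        (fun j => PySem.List.pyGetD nums j 0 == PySem.List.pyGetD nums i 0)).map
      (fun j => (j, i)))

-- ===== PRECONDITION & SPEC =====
def Spec_find_nearby_duplicates (nums : List Int) (k : Int) (out : List (Int × Int)) : Prop := out = find_nearby_duplicates_alt nums k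
instance (nums : List Int) (k : Int) (out : List (Int × Int)) : Decidable (Spec_find_nearby_duplicates nums k out) := by unfold Spec_find_nearby_duplicates; infer_instance

-- ===== CLAIM (what is proved, stated in full; the proofs are below) =====
def Claim_equal_find_nearby_duplicates : Prop := ∀ (nums : List Int) (k : Int), Dom_find_nearby_duplicates nums k → Spec_find_nearby_duplicates nums k (find_nearby_duplicates nums k)

-- ===== LEMMAS AND PROOFS =====

lemma fnd_pyRange_filter_le (t b : Int) (a : Int) :
    (PySem.List.pyRange a b 1).filter (fun j => decide (t ≤ j)) = PySem.List.pyRange (max a t) b 1 := by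
  generalize hn : (b - a).toNat = n
  induction n generalizing a with
  | zero =>
      have hab : b ≤ a := by omega
      rw [PySem.List.pyRange_one_eq_nil hab,
          PySem.List.pyRange_one_eq_nil (le_trans hab (le_max_left a t))]
      rfl
  | succ n ih =>
      have hab : a < b := by omega
      rw [PySem.List.pyRange_one_cons hab, List.filter_cons, ih (a + 1) (by omega)]
      by_cases hta : t ≤ a
      · have h1 : max a t = a := by omega
        have h2 : max (a + 1) t = a + 1 := by omega
        simp only [hta, decide_true, h1, h2, if_true]
        rw [PySem.List.pyRange_one_cons hab]
      · have h1 : max a t = t := by omega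
        have h2 : max (a + 1) t = t := by omega
        simp only [hta, decide_false, h1, h2, Bool.false_eq_true, if_false]

lemma fnd_pyGetD_append_left (xs : List Int) (x : Int) (j : Int) (h0 : 0 ≤ j)
    (h : j < (xs.length : Int)) :
    PySem.List.pyGetD (xs ++ [x]) j 0 = PySem.List.pyGetD xs j 0 := by
  rw [PySem.List.pyGetD_of_nonneg _ _ h0, PySem.List.pyGetD_of_nonneg _ _ h0]
  have hj : j.toNat < xs.length := by omega
  simp [List.getD, List.getElem?_append_left hj]

lemma fnd_pyGetD_append_last (xs : List Int) (x : Int) :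
    PySem.List.pyGetD (xs ++ [x]) (xs.length : Int) 0 = x := by
  rw [PySem.List.pyGetD_of_nonneg _ _ (by positivity)]
  simp [List.getD]

def fnd_occ (xs : List Int) (v : Int) : List Int :=
  (PySem.List.pyRange 0 (PySem.List.len xs) 1).filter (fun j => PySem.List.pyGetD xs j 0 == v)

lemma fnd_occ_append (xs : List Int) (x v : Int) :
    fnd_occ (xs ++ [x]) v = fnd_occ xs v ++ (if x == v then [(xs.length : Int)] else []) := by
  unfold fnd_occ
  have hlen : PySem.List.len (xs ++ [x]) = (xs.length : Int) + 1 := by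
    simp [PySem.List.len]
  rw [hlen, PySem.List.pyRange_one_succ_right (by positivity), List.filter_append]
  congr 1
  · apply List.filter_congr
    intro j hj
    have hb := PySem.List.mem_pyRange_one.1 hj
    rw [fnd_pyGetD_append_left xs x j hb.1 hb.2]
  · rw [List.filter_cons]
    rw [show (PySem.List.pyGetD (xs ++ [x]) (↑xs.length) 0 == v) = (x == v) from by
      rw [fnd_pyGetD_append_last]]
    by_cases h : x == v <;> simp [h]

lemma fnd_window (xs : List Int) (x k : Int) :
    (PySem.List.pyRange (max 0 ((xs.length : Int) - k)) (xs.length : Int) 1).filter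
        (fun j => PySem.List.pyGetD (xs ++ [x]) j 0 == PySem.List.pyGetD (xs ++ [x]) (xs.length : Int) 0)
    = (fnd_occ xs x).filter (fun j => decide ((xs.length : Int) - j ≤ k)) := by
  have h1 : (PySem.List.pyRange (max 0 ((xs.length : Int) - k)) (xs.length : Int) 1).filter
        (fun j => PySem.List.pyGetD (xs ++ [x]) j 0 == PySem.List.pyGetD (xs ++ [x]) (xs.length : Int) 0)
      = (PySem.List.pyRange (max 0 ((xs.length : Int) - k)) (xs.length : Int) 1).filter
        (fun j => PySem.List.pyGetD xs j 0 == x) := by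
    apply List.filter_congr
    intro j hj
    have hb := PySem.List.mem_pyRange_one.1 hj
    have h0 : (0 : Int) ≤ j := le_trans (le_max_left _ _) hb.1
    rw [fnd_pyGetD_append_left xs x j h0 hb.2, fnd_pyGetD_append_last]
  rw [h1, ← fnd_pyRange_filter_le ((xs.length : Int) - k) (xs.length : Int) 0,
      List.filter_filter]
  unfold fnd_occ
  have h2 : (PySem.List.pyRange 0 (PySem.List.len xs) 1) = PySem.List.pyRange 0 ((xs.length : Int)) 1 := by
    simp [PySem.List.len]
  rw [h2, List.filter_filter]
  apply List.filter_congr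
  intro j hj
  have : (decide ((xs.length : Int) - k ≤ j)) = (decide ((xs.length : Int) - j ≤ k)) := by
    simp only [decide_eq_decide]; omega
  rw [this]
  exact Bool.and_comm _ _

lemma fnd_alt_append (xs : List Int) (x k : Int) :
    find_nearby_duplicates_alt (xs ++ [x]) k
      = find_nearby_duplicates_alt xs k
        ++ ((fnd_occ xs x).filter (fun j => decide ((xs.length : Int) - j ≤ k))).map
            (fun j => (j, (xs.length : Int))) := by
  unfold find_nearby_duplicates_alt
  have hlen : PySem.List.len (xs ++ [x]) = (xs.length : Int) + 1 := by simp [PySem.List.len]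
  have h2 : PySem.List.len xs = ((xs.length : Int)) := by simp [PySem.List.len]
  rw [hlen, h2, PySem.List.pyRange_one_succ_right (by positivity), List.flatMap_append]
  congr 1
  · apply List.flatMap_congr
    intro i hi
    have hb := PySem.List.mem_pyRange_one.1 hi
    have hgi : PySem.List.pyGetD (xs ++ [x]) i 0 = PySem.List.pyGetD xs i 0 :=
      fnd_pyGetD_append_left xs x i hb.1 hb.2
    congr 1
    apply List.filter_congr
    intro j hj
    have hbj := PySem.List.mem_pyRange_one.1 hj
    have h0j : (0 : Int) ≤ j := le_trans (le_max_left _ _) hbj.1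
    rw [fnd_pyGetD_append_left xs x j h0j (lt_trans hbj.2 hb.2), hgi]
  · rw [List.flatMap_cons, List.flatMap_nil, List.append_nil, fnd_window]

lemma fnd_fold_spec (k : Int) (xs : List Int) :
    ((PySem.List.enumerate xs 0).foldl (fndA_step k) ([], PySem.Dict.empty)).1
        = find_nearby_duplicates_alt xs k
    ∧ (∀ v : Int, ((PySem.List.enumerate xs 0).foldl (fndA_step k) ([], PySem.Dict.empty)).2.getD v []
        = fnd_occ xs v)
    ∧ (∀ v : Int, ((PySem.List.enumerate xs 0).foldl (fndA_step k) ([], PySem.Dict.empty)).2.contains v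
        = !(fnd_occ xs v).isEmpty) := by
  induction xs using List.reverseRecOn with
  | nil =>
      refine ⟨?_, ?_, ?_⟩
      · simp [PySem.List.enumerate, find_nearby_duplicates_alt, PySem.List.len,
          PySem.List.pyRange_one_eq_nil (le_refl (0 : Int))]
      · intro v
        simp [PySem.List.enumerate, fnd_occ, PySem.List.len, PySem.Dict.getD_empty,
          PySem.List.pyRange_one_eq_nil (le_refl (0 : Int))]
      · intro v
        simp [PySem.List.enumerate, fnd_occ, PySem.Dict.contains_empty, PySem.List.len,
          PySem.List.pyRange_one_eq_nil (le_refl (0 : Int))]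
  | append_singleton xs x ih =>
      obtain ⟨h1, h2, h3⟩ := ih
      rw [PySem.List.enumerate_append, List.foldl_append]
      have he : PySem.List.enumerate [x] (0 + (xs.length : Int)) = [((xs.length : Int), x)] := by
        simp [PySem.List.enumerate]
      rw [he]
      set st := (PySem.List.enumerate xs 0).foldl (fndA_step k) ([], PySem.Dict.empty) with hst
      set n : Int := (xs.length : Int) with hn
      simp only [List.foldl_cons, List.foldl_nil]
      -- the pruned index list seen by this step
      have hdx : ∀ w : Int,
          (if st.2.contains x then st.2 else st.2.insert x []).getD w [] = st.2.getD w [] := by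
        intro w
        by_cases hc : st.2.contains x
        · rw [if_pos hc]
        · rw [if_neg hc, PySem.Dict.getD_insert]
          by_cases hw : w = x
          · subst hw
            rw [if_pos rfl, h2 w]
            have hcf : st.2.contains w = false := by simpa using hc
            have : (fnd_occ xs w).isEmpty = true := by
              have := h3 w; rw [hcf] at this; simpa using this.symm
            rw [List.isEmpty_iff.1 this]
          · rw [if_neg hw]
      refine ⟨?_, ?_, ?_⟩
      · -- pairs component
        show (fndA_step k st (n, x)).1 = _
        unfold fndA_step
        simp only []
        rw [fnd_alt_append, ← h1]
        by_cases hc : st.2.contains x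
        · rw [if_pos hc, h2 x]
          exact PySem.List.foldl_append_ite (fun j => n - j ≤ k) (fun j => (j, n)) _ _
        · rw [if_neg hc]
          have hcf : st.2.contains x = false := by simpa using hc
          have hocc : fnd_occ xs x = [] := by
            have := h3 x; rw [hcf] at this
            exact List.isEmpty_iff.1 (by simpa using this.symm)
          rw [hocc]
          simp
      · -- getD component
        intro v
        show ((fndA_step k st (n, x)).2).getD v [] = _
        unfold fndA_step
        simp only []
        rw [PySem.Dict.getD_modify, fnd_occ_append]
        by_cases hv : v = x
        · subst hv
          rw [if_pos rfl, hdx v, h2 v]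
          simp [hn]
        · rw [if_neg hv, hdx v, h2 v]
          have : (x == v) = false := by simp [Ne.symm hv]
          rw [this]
          simp
      · -- contains component
        intro v
        show ((fndA_step k st (n, x)).2).contains v = _
        unfold fndA_step
        simp only []
        rw [PySem.Dict.contains_modify, fnd_occ_append]
        by_cases hv : v = x
        · subst hv
          simp
        · have hbv : (v == x) = false := by simp [hv]
          have hbv' : (x == v) = false := by simp [Ne.symm hv]
          rw [hbv, hbv']
          by_cases hc : st.2.contains x
          · rw [if_pos hc]
            simp [h3 v]
          · rw [if_neg hc, PySem.Dict.contains_insert, hbv]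
            simp [h3 v]

-- ===== VERDICT (by name: the statement is the Claim_ definition above) =====
theorem find_nearby_duplicates_spec : Claim_equal_find_nearby_duplicates := by
  intro nums k _
  unfold Spec_find_nearby_duplicates find_nearby_duplicates
  exact (fnd_fold_spec k nums).1
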